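-- pv_equiv track=rewrite | github.com/zinchen-ko/security | first.py | encrypte
-- ===== SOURCE A (Python) =====
-- def encrypte(text_ord, replace):
--     length = len(replace)
--     blink = 0
--     replace_i = 0
--     if len(text_ord) % length > 0:
--         result = [32] * (len(text_ord) + 1)
--     else:
--         result = [32] * len(text_ord)
--     for i in text_ord:
--         result[blink * length + replace[replace_i]] = i
--         if replace_i == length - 1:
--             blink = blink + 1
--             replace_i = 0
--         else:
--             replace_i = replace_i + 1
--     return result
-- ===== SOURCE B (Python) =====
-- def encrypte(text_ord, replace):
--     length = len(replace)
--     size = len(text_ord) + 1 if len(text_ord) % length > 0 else len(text_ord)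
--     result = [32] * size
--     for start in range(0, len(text_ord), length):
--         for pos, value in enumerate(text_ord[start:start + length]):
--             result[start + replace[pos]] = value
--     return result
-- ===== Notes on version B (the rewrite author's own statement) =====
-- stated objective: simpler
-- what changed: replaces A's stateful single loop with running blink/replace_i counters by a block-wise traversal: slice the text into length-sized chunks and place each chunk's values by their in-chunk position
import Mathlib
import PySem

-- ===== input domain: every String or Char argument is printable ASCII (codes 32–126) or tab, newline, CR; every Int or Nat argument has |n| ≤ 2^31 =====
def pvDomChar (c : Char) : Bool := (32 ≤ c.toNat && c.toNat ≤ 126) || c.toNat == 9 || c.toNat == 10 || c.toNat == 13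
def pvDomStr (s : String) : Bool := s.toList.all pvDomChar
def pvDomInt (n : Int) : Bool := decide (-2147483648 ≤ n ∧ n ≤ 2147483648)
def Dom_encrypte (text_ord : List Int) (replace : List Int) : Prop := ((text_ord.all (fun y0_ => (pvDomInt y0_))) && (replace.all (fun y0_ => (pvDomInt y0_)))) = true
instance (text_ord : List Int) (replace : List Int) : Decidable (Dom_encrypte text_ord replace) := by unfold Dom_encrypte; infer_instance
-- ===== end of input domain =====

-- B replaces A's single loop with running blink/replace_i counters by a block-wise traversal
-- (length-sized slices placed by in-chunk position); equal return values on Pre_, the inputs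
-- where A's list writes are valid Python assignments.

-- Python 'result[i] = v' (shared by both ports): exact where the assignment succeeds
-- (a negative index wraps); identity where Python raises IndexError (excluded by Pre_encrypte).
def pySetWrap (xs : List Int) (i : Int) (v : Int) : List Int :=
  let j : Int := if i < 0 then i + xs.length else i
  if 0 ≤ j ∧ j < (xs.length : Int) then xs.set j.toNat v else xs

-- ===== PORT A =====
-- the body of A's for-loop, on the state (blink, replace_i, result)
def encrypteStep (replace : List Int) (s : Nat × Nat × List Int) (i : Int) : Nat × Nat × List Int :=
  let res := pySetWrap s.2.2 (((s.1 * replace.length : Nat) : Int) + PySem.List.pyGetD replace (s.2.1 : Int) 0) i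
  if s.2.1 = replace.length - 1 then (s.1 + 1, 0, res) else (s.1, s.2.1 + 1, res)

def encrypte (text_ord : List Int) (replace : List Int) : List Int :=
  let result :=
    if text_ord.length % replace.length > 0 then List.replicate (text_ord.length + 1) (32 : Int)
    else List.replicate text_ord.length (32 : Int)
  (text_ord.foldl (encrypteStep replace) (0, 0, result)).2.2

-- ===== PORT B =====
def encrypte_alt (text_ord : List Int) (replace : List Int) : List Int :=
  let length := replace.length
  let size := if text_ord.length % replace.length > 0 then text_ord.length + 1 else text_ord.length
  (PySem.List.pyRange 0 (text_ord.length : Int) (length : Int)).foldl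
    (fun result start =>
      (PySem.List.enumerate (PySem.List.slice text_ord (some start) (some (start + (length : Int))))).foldl
        (fun res (p : Int × Int) => pySetWrap res (start + PySem.List.pyGetD replace p.1 0) p.2)
        result)
    (List.replicate size (32 : Int))

-- ===== PRECONDITION & SPEC =====
-- the write target of element number c (0-based), as both programs compute it
def pvKey (replace : List Int) (c : Nat) : Int :=
  ((c / replace.length * replace.length : Nat) : Int) + replace.getD (c % replace.length) 0

-- Pre_ admits exactly the inputs on which A returns: replace nonempty (else ZeroDivisionError)
-- and every write target a valid Python index of the result (else IndexError).
def Pre_encrypte (text_ord : List Int) (replace : List Int) : Prop :=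
  replace ≠ [] ∧ ∀ c : Nat, c < text_ord.length →
    -(((if text_ord.length % replace.length > 0 then text_ord.length + 1
        else text_ord.length : Nat) : Int)) ≤ pvKey replace c ∧
      pvKey replace c <
        ((if text_ord.length % replace.length > 0 then text_ord.length + 1
          else text_ord.length : Nat) : Int)
instance (text_ord : List Int) (replace : List Int) : Decidable (Pre_encrypte text_ord replace) := by
  unfold Pre_encrypte; infer_instance

def pvWitness_encrypte : List Int × List Int := ([65, 66, 67, 68], [1, 0, 2])

def Spec_encrypte (text_ord : List Int) (replace : List Int) (out : List Int) : Prop := out = encrypte_alt text_ord replace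
instance (text_ord : List Int) (replace : List Int) (out : List Int) : Decidable (Spec_encrypte text_ord replace out) := by unfold Spec_encrypte; infer_instance

-- ===== CLAIM (what is proved, stated in full; the proofs are below) =====
def Claim_equal_encrypte : Prop := ∀ (text_ord : List Int) (replace : List Int), Dom_encrypte text_ord replace → Pre_encrypte text_ord replace → Spec_encrypte text_ord replace (encrypte text_ord replace)

-- ===== LEMMAS AND PROOFS =====

-- shared spine: sequential writes of the elements of l at targets pvKey c, c counting up
def pvSets (replace : List Int) : Nat → List Int → List Int → List Int
  | _, [], res => res
  | c, v :: l, res => pvSets replace (c + 1) l (pySetWrap res (pvKey replace c) v)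

theorem pvSets_append (replace : List Int) (xs : List Int) :
    ∀ (ys : List Int) (c : Nat) (res : List Int),
      pvSets replace c (xs ++ ys) res = pvSets replace (c + xs.length) ys (pvSets replace c xs res) := by
  induction xs with
  | nil => intro ys c res; simp [pvSets]
  | cons v xs ih =>
    intro ys c res
    rw [List.cons_append, pvSets, pvSets, ih,
      show c + 1 + xs.length = c + (xs.length + 1) from by omega]
    rfl

theorem encrypteStep_eq (replace : List Int) (b r : Nat) (res : List Int) (v : Int)
    (hr : r < replace.length) :
    encrypteStep replace (b, r, res) v =
      if r = replace.length - 1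
      then (b + 1, 0, pySetWrap res (pvKey replace (b * replace.length + r)) v)
      else (b, r + 1, pySetWrap res (pvKey replace (b * replace.length + r)) v) := by
  have hL : 0 < replace.length := by omega
  have h1 : (b * replace.length + r) / replace.length = b := by
    rw [Nat.add_comm, Nat.add_mul_div_right _ _ hL, Nat.div_eq_of_lt hr, Nat.zero_add]
  have h2 : (b * replace.length + r) % replace.length = r := by
    rw [Nat.add_comm, Nat.add_mul_mod_self_right, Nat.mod_eq_of_lt hr]
  have hkey : ((b * replace.length : Nat) : Int) + PySem.List.pyGetD replace (r : Int) 0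
      = pvKey replace (b * replace.length + r) := by
    unfold pvKey
    rw [h1, h2, PySem.List.pyGetD_natCast]
  unfold encrypteStep
  dsimp only
  rw [hkey]

theorem foldl_encrypteStep (replace : List Int) (hL : 0 < replace.length) (l : List Int) :
    ∀ (b r : Nat) (res : List Int), r < replace.length →
      (l.foldl (encrypteStep replace) (b, r, res)).2.2
        = pvSets replace (b * replace.length + r) l res := by
  induction l with
  | nil => intro b r res _; rfl
  | cons v l ih =>
    intro b r res hr
    rw [List.foldl_cons, encrypteStep_eq replace b r res v hr]
    by_cases hc : r = replace.length - 1
    · rw [if_pos hc, ih _ _ _ hL, pvSets,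
        show b * replace.length + r + 1 = (b + 1) * replace.length + 0 from by
          rw [Nat.add_zero, Nat.succ_mul]; omega]
    · rw [if_neg hc, ih _ _ _ (by omega), pvSets,
        show b * replace.length + r + 1 = b * replace.length + (r + 1) from by omega]

theorem encrypte_eq_pvSets (text_ord replace : List Int) (h0 : replace ≠ []) :
    encrypte text_ord replace =
      pvSets replace 0 text_ord
        (List.replicate (if text_ord.length % replace.length > 0 then text_ord.length + 1
          else text_ord.length) (32 : Int)) := by
  have hL : 0 < replace.length := List.length_pos_of_ne_nil h0
  unfold encrypte
  have h := foldl_encrypteStep replace hL text_ord 0 0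
    (if text_ord.length % replace.length > 0 then List.replicate (text_ord.length + 1) (32 : Int)
     else List.replicate text_ord.length (32 : Int)) hL
  rw [show 0 * replace.length + 0 = 0 from by omega] at h
  rw [h]
  congr 1
  split <;> rfl

-- range(a, b, s) for positive step: the two induction forms, from PySem.List.pyRange_of_pos
theorem pyRangeP_nil (a b s : Int) (hs : 0 < s) (h : b ≤ a) : PySem.List.pyRange a b s = [] := by
  rw [PySem.List.pyRange_of_pos _ _ hs, if_neg (by omega)]
  rfl

theorem pyRangeP_cons (a b s : Int) (hs : 0 < s) (h : a < b) :
    PySem.List.pyRange a b s = a :: PySem.List.pyRange (a + s) b s := by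
  rw [PySem.List.pyRange_of_pos _ _ hs, PySem.List.pyRange_of_pos _ _ hs, if_pos h]
  by_cases h2 : a + s < b
  · rw [if_pos h2]
    have hm : (b - a + s - 1) / s = (b - (a + s) + s - 1) / s + 1 := by
      rw [show b - a + s - 1 = (b - (a + s) + s - 1) + 1 * s from by ring,
        Int.add_mul_ediv_right _ _ (by omega)]
    have hm2 : 0 ≤ (b - (a + s) + s - 1) / s := Int.ediv_nonneg (by omega) (by omega)
    rw [hm, show ((b - (a + s) + s - 1) / s + 1).toNat = ((b - (a + s) + s - 1) / s).toNat + 1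
      from by omega, List.range_succ_eq_map]
    simp only [List.map_cons, List.map_map, Nat.cast_zero, mul_zero, add_zero]
    congr 1
    apply List.map_congr_left
    intro k _
    simp only [Function.comp_apply]
    push_cast
    ring
  · rw [if_neg h2]
    have hx : (b - a + s - 1) / s = 1 := by
      have h3 := (PySem.Int.floordiv_eq_iff_of_pos (a := b - a + s - 1) (q := 1) hs).mpr
        (by constructor <;> omega)
      rw [PySem.Int.floordiv_eq_ediv_of_pos hs] at h3
      exact h3
    rw [hx]
    simp

theorem inner_chunk_eq (replace : List Int) (hL : 0 < replace.length) (b : Nat) (chunk : List Int) :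
    ∀ (pos : Nat) (res : List Int), pos + chunk.length ≤ replace.length →
      (PySem.List.enumerate chunk (pos : Int)).foldl
        (fun res (p : Int × Int) =>
          pySetWrap res (((b * replace.length : Nat) : Int) + PySem.List.pyGetD replace p.1 0) p.2)
        res
      = pvSets replace (b * replace.length + pos) chunk res := by
  induction chunk with
  | nil => intro pos res _; rfl
  | cons v l ih =>
    intro pos res hbound
    have hpos : pos < replace.length := by simp at hbound; omega
    rw [PySem.List.enumerate_cons, List.foldl_cons,
      show ((pos : Int) + 1) = ((pos + 1 : Nat) : Int) from by push_cast; ring]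
    have hkey : ((b * replace.length : Nat) : Int) + PySem.List.pyGetD replace (pos : Int) 0
        = pvKey replace (b * replace.length + pos) := by
      unfold pvKey
      rw [show (b * replace.length + pos) / replace.length = b from by
          rw [Nat.add_comm, Nat.add_mul_div_right _ _ hL, Nat.div_eq_of_lt hpos, Nat.zero_add],
        show (b * replace.length + pos) % replace.length = pos from by
          rw [Nat.add_comm, Nat.add_mul_mod_self_right, Nat.mod_eq_of_lt hpos],
        PySem.List.pyGetD_natCast]
    rw [ih (pos + 1) _ (by simp at hbound ⊢; omega), pvSets]
    dsimp only
    rw [hkey, show b * replace.length + pos + 1 = b * replace.length + (pos + 1) from by omega]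

theorem outer_blocks_eq (text_ord replace : List Int) (hL : 0 < replace.length) :
    ∀ (m : Nat) (l : List Int) (b : Nat) (res : List Int),
      l.length = m → l = text_ord.drop (b * replace.length) →
      (PySem.List.pyRange ((b * replace.length : Nat) : Int) (text_ord.length : Int) (replace.length : Int)).foldl
        (fun result start =>
          (PySem.List.enumerate (PySem.List.slice text_ord (some start) (some (start + (replace.length : Int))))).foldl
            (fun res (p : Int × Int) => pySetWrap res (start + PySem.List.pyGetD replace p.1 0) p.2)
            result)
        res
      = pvSets replace (b * replace.length) l res := by
  intro m
  induction m using Nat.strong_induction_on with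
  | _ m ih =>
    intro l b res hm hdrop
    by_cases hlt : b * replace.length < text_ord.length
    · have hcons := pyRangeP_cons ((b * replace.length : Nat) : Int) (text_ord.length : Int)
        (replace.length : Int) (by exact_mod_cast hL) (by exact_mod_cast hlt)
      rw [hcons, List.foldl_cons]
      have hslice : PySem.List.slice text_ord (some ((b * replace.length : Nat) : Int))
          (some (((b * replace.length : Nat) : Int) + (replace.length : Int)))
          = l.take replace.length := by
        rw [PySem.List.slice_natCast_add text_ord (b * replace.length) replace.length, hdrop]
      have hinner := inner_chunk_eq replace hL b (l.take replace.length) 0 res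
        (by simp)
      rw [Nat.cast_zero] at hinner
      rw [hslice, hinner, Nat.add_zero]
      have hlen : 0 < l.length := by
        rw [hdrop, List.length_drop]; omega
      have hnext : ((b * replace.length : Nat) : Int) + (replace.length : Int)
          = (((b + 1) * replace.length : Nat) : Int) := by push_cast; ring
      rw [hnext, ih (l.drop replace.length).length
        (by rw [List.length_drop]; omega) (l.drop replace.length) (b + 1) _ rfl
        (by rw [hdrop, List.drop_drop,
          show b * replace.length + replace.length = (b + 1) * replace.length from by
            rw [Nat.succ_mul]])]
      by_cases hfull : replace.length ≤ l.length
      · conv_rhs => rw [← List.take_append_drop replace.length l]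
        rw [pvSets_append,
          show b * replace.length + (l.take replace.length).length = (b + 1) * replace.length from by
            rw [List.length_take, Nat.succ_mul]; omega]
      · rw [List.drop_eq_nil_of_le (by omega), List.take_of_length_le (by omega)]
        rfl
    · rw [pyRangeP_nil _ _ _ (by exact_mod_cast hL)
          (by exact_mod_cast (by omega : text_ord.length ≤ b * replace.length)),
        show l = [] from by rw [hdrop]; exact List.drop_eq_nil_of_le (by omega)]
      rfl

theorem encrypte_alt_eq_pvSets (text_ord replace : List Int) (h0 : replace ≠ []) :
    encrypte_alt text_ord replace =
      pvSets replace 0 text_ord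
        (List.replicate (if text_ord.length % replace.length > 0 then text_ord.length + 1
          else text_ord.length) (32 : Int)) := by
  have hL : 0 < replace.length := List.length_pos_of_ne_nil h0
  unfold encrypte_alt
  have h := outer_blocks_eq text_ord replace hL text_ord.length text_ord 0
    (List.replicate (if text_ord.length % replace.length > 0 then text_ord.length + 1
      else text_ord.length) (32 : Int)) rfl (by simp)
  rw [show 0 * replace.length = 0 from by omega] at h
  rw [Nat.cast_zero] at h
  exact h

-- ===== VERDICT (by name: the statement is the Claim_ definition above) =====
theorem encrypte_spec : Claim_equal_encrypte := by
  intro text_ord replace _ hpre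
  unfold Spec_encrypte
  rw [encrypte_eq_pvSets _ _ hpre.1, encrypte_alt_eq_pvSets _ _ hpre.1]
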